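-- pv_equiv track=rewrite | github.com/soham0005/UG | DM_03_Binning.py | binning_by_boundaries
-- ===== SOURCE A (Python) =====
-- def binning_by_boundaries(data, bin_size):
--     if bin_size == 0:
--         return data
--
--     data.sort()
--     binned_data = []
--
--     for i in range(0, len(data), bin_size):
--         bin_data = data[i:i+bin_size]
--         min_val = bin_data[0]
--         max_val = bin_data[-1]
--         bin_result = []
--         for value in bin_data:
--             if abs(value - min_val) < abs(value - max_val):
--                 bin_result.append(min_val)
--             else:
--                 bin_result.append(max_val)
--         binned_data.append(bin_result)
--
--     return binned_data
-- ===== SOURCE B (Python) =====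
-- def binning_by_boundaries(data, bin_size):
--     if bin_size == 0:
--         return data
--
--     data.sort()
--     out = []
--     if bin_size < 0:
--         # a non-positive bin size yields no bins
--         return out
--
--     n = len(data)
--     # single flat pass: the bin boundaries of position j are read off the
--     # sorted list by index arithmetic (no slicing, no per-bin min/max scan);
--     # a new bin is opened exactly when j is a multiple of bin_size
--     for j, v in enumerate(data):
--         base = j - j % bin_size
--         lo = data[base]
--         hi = data[min(base + bin_size, n) - 1]
--         snapped = lo if 2 * v < lo + hi else hi
--         if j % bin_size == 0:
--             out.append([snapped])
--         else:
--             out[-1].append(snapped)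
--     return out
-- ===== Notes on version B (the rewrite author's own statement) =====
-- stated objective: alternative
-- what changed: B replaces A's per-bin slicing with its per-element abs-distance comparisons by one flat enumerate pass over the sorted list: each position's bin boundaries are fetched by index arithmetic (base = j - j % bin_size, top = min(base+bin_size, n)-1), the exact tie rule kept via the undivided comparison 2*v < lo+hi, and output bins are grown in place, opening a new one exactly at multiples of bin_size.
-- outside the precondition, e.g. on binning_by_boundaries([2, 1], 0): A returns [2, 1], B returns [2, 1]
import Mathlib
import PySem

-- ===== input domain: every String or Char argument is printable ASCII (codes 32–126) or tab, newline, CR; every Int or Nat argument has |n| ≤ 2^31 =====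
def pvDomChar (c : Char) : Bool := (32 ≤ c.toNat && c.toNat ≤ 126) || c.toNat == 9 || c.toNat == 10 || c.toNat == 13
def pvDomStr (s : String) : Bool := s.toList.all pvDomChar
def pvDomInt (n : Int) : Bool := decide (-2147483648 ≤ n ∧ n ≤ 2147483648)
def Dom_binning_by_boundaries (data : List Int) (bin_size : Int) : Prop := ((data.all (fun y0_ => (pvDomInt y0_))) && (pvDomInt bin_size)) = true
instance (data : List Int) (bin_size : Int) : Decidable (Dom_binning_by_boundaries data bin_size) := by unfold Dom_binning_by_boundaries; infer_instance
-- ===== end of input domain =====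

-- B replaces A's per-bin slicing and per-element abs-distance test by a single flat
-- enumerate pass over the sorted list: each position's bin boundaries are read off by
-- index arithmetic (base = j - j % bin_size) and a new output bin is opened exactly at
-- multiples of bin_size; objective: alternative decomposition (same asymptotic cost).
-- Both A and B sort `data` in place; the equivalence proved is about the return value
-- (the mutation is identical anyway).

-- ===== PORT A =====
def binning_by_boundaries (data : List Int) (bin_size : Int) : List (List Int) :=
  if bin_size = 0 then []   -- Python returns the flat list `data` here: not a list[list[int]]; excluded by Pre_
  else
    let d := PySem.List.sorted data (fun x => x) false
    (PySem.List.pyRange 0 (d.length : Int) bin_size).foldl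
      (fun binned_data i =>
        let bin_data := PySem.List.slice d (some i) (some (i + bin_size))
        let min_val := PySem.List.pyGetD bin_data 0 0
        let max_val := PySem.List.pyGetD bin_data (-1) 0
        let bin_result := bin_data.foldl
          (fun acc value =>
            if |value - min_val| < |value - max_val| then acc ++ [min_val]
            else acc ++ [max_val]) []
        binned_data ++ [bin_result]) []

-- ===== PORT B =====
def binning_by_boundaries_alt (data : List Int) (bin_size : Int) : List (List Int) :=
  if bin_size = 0 then []   -- same unreachable-under-Pre_ guard as in Source B
  else
    let d := PySem.List.sorted data (fun x => x) false
    if bin_size < 0 then []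
    else
      let n : Int := d.length
      (PySem.List.enumerate d 0).foldl
        (fun out jv =>
          let base := jv.1 - PySem.Int.mod jv.1 bin_size
          let lo := PySem.List.pyGetD d base 0
          let hi := PySem.List.pyGetD d (min (base + bin_size) n - 1) 0
          let snapped := if 2 * jv.2 < lo + hi then lo else hi
          if PySem.Int.mod jv.1 bin_size = 0 then out ++ [[snapped]]
          else out.dropLast ++ [out.getLastD [] ++ [snapped]]) []

-- ===== PRECONDITION & SPEC =====
-- Pre_ excludes only bin_size = 0: there Python A (and B) return the flat input list `data`,
-- which is not a value of the declared return type list[list[int]].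
def Pre_binning_by_boundaries (data : List Int) (bin_size : Int) : Prop := bin_size ≠ 0
instance (data : List Int) (bin_size : Int) : Decidable (Pre_binning_by_boundaries data bin_size) := by unfold Pre_binning_by_boundaries; infer_instance
def pvWitness_binning_by_boundaries : List Int × Int := ([5, 1, 3, 9], 2)

def Spec_binning_by_boundaries (data : List Int) (bin_size : Int) (out : List (List Int)) : Prop := out = binning_by_boundaries_alt data bin_size
instance (data : List Int) (bin_size : Int) (out : List (List Int)) : Decidable (Spec_binning_by_boundaries data bin_size out) := by unfold Spec_binning_by_boundaries; infer_instance

-- ===== CLAIM (what is proved, stated in full; the proofs are below) =====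
def Claim_equal_binning_by_boundaries : Prop := ∀ (data : List Int) (bin_size : Int), Dom_binning_by_boundaries data bin_size → Pre_binning_by_boundaries data bin_size → Spec_binning_by_boundaries data bin_size (binning_by_boundaries data bin_size)

-- ===== LEMMAS AND PROOFS =====

-- the canonical per-bin result: each value snaps to the nearer of the bin's first/last element
def pvCanonBin (c : List Int) : List Int :=
  c.map (fun v =>
    if 2 * v < PySem.List.pyGetD c 0 0 + PySem.List.pyGetD c (-1) 0
    then PySem.List.pyGetD c 0 0 else PySem.List.pyGetD c (-1) 0)

-- the list split into chunks of size K (K ≥ 1 intended; structurally decreasing)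
def pvChunks (K : Nat) : List Int → List (List Int)
  | [] => []
  | x :: rest => (x :: rest.take (K - 1)) :: pvChunks K (rest.drop (K - 1))
termination_by l => l.length
decreasing_by simp [List.length_drop]

-- B's output described chunk by chunk: the h-image of the indexed chunk starting at m
def pvChunksIdx (K : Nat) (h : Int → Int → Int) : Nat → List Int → List (List Int)
  | _, [] => []
  | m, x :: rest =>
      ((PySem.List.enumerate (x :: rest.take (K - 1)) (m : Int)).map (fun p => h p.1 p.2)) ::
        pvChunksIdx K h (m + K) (rest.drop (K - 1))
termination_by _ l => l.length
decreasing_by simp [List.length_drop]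

theorem pv_pyRange_pos_nil (a b s : Int) (hs : 0 < s) (hba : b ≤ a) :
    PySem.List.pyRange a b s = [] := by
  rw [PySem.List.pyRange_of_pos _ _ hs]
  simp [show ¬ a < b by omega]

theorem pv_pyRange_neg_nil (b s : Int) (hs : s < 0) (hb : 0 ≤ b) :
    PySem.List.pyRange 0 b s = [] := by
  unfold PySem.List.pyRange
  simp [show ¬ s = 0 by omega, show ¬ 0 < s by omega, show ¬ b < 0 by omega]

theorem pv_pyRange_pos_cons (a b s : Int) (hs : 0 < s) (hab : a < b) :
    PySem.List.pyRange a b s = a :: PySem.List.pyRange (a + s) b s := by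
  rw [PySem.List.pyRange_of_pos _ _ hs, PySem.List.pyRange_of_pos _ _ hs]
  have key : (if a < b then ((b - a + s - 1) / s).toNat else 0) =
      (if a + s < b then ((b - (a + s) + s - 1) / s).toNat else 0) + 1 := by
    rw [if_pos hab]
    by_cases h2 : a + s < b
    · rw [if_pos h2]
      have e1 : b - a + s - 1 = (b - (a + s) + s - 1) + 1 * s := by ring
      rw [e1, Int.add_mul_ediv_right _ _ (by omega : s ≠ 0)]
      have : 0 ≤ (b - (a + s) + s - 1) / s := Int.ediv_nonneg (by omega) (by omega)
      omega
    · rw [if_neg h2]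
      have e1 : b - a + s - 1 = (b - a - 1) + 1 * s := by ring
      rw [e1, Int.add_mul_ediv_right _ _ (by omega : s ≠ 0)]
      have : (b - a - 1) / s = 0 := Int.ediv_eq_zero_of_lt (by omega) (by omega)
      omega
  rw [key, List.range_succ_eq_map]
  simp only [List.map_cons, List.map_map]
  congr 1
  · simp
  · apply List.map_congr_left
    intro x _
    simp [Function.comp, Nat.succ_eq_add_one]
    ring


theorem pv_pyRange_pos_shift (a b s : Int) (hs : 0 < s) :
    PySem.List.pyRange (a + s) b s = (PySem.List.pyRange a (b - s) s).map (· + s) := by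
  rw [PySem.List.pyRange_of_pos _ _ hs, PySem.List.pyRange_of_pos _ _ hs]
  have key : (if a + s < b then ((b - (a + s) + s - 1) / s).toNat else 0) =
      (if a < b - s then ((b - s - a + s - 1) / s).toNat else 0) := by
    have e : b - (a + s) + s - 1 = b - s - a + s - 1 := by ring
    rw [e]
    simp only [show (a + s < b) ↔ (a < b - s) by omega]
  rw [key, List.map_map]
  apply List.map_congr_left
  intro x _
  simp [Function.comp]
  ring

-- every member of a ≤-sorted nonempty list is ≤ its last element
theorem pv_le_getLast : ∀ (l : List Int) (h : l ≠ []), l.Pairwise (· ≤ ·) →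
    ∀ v ∈ l, v ≤ l.getLast h := by
  intro l
  induction l with
  | nil => intro h; exact absurd rfl h
  | cons x t ih =>
    intro _ hp v hv
    rcases List.pairwise_cons.mp hp with ⟨hx, ht⟩
    cases t with
    | nil =>
      simp only [List.mem_singleton] at hv
      simp [hv]
    | cons y u =>
      rw [List.getLast_cons (by simp)]
      rcases List.mem_cons.mp hv with hv | hv
      · subst hv; exact hx _ (List.getLast_mem _)
      · exact ih (by simp) ht v hv

-- a slice is a sublist of the original list
theorem pv_slice_sublist {α : Type} (xs : List α) (a b : Option Int) :
    (PySem.List.slice xs a b).Sublist xs := by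
  unfold PySem.List.slice
  exact ((List.take_sublist _ _).trans (List.drop_sublist _ _))

-- A's inner loop on a sorted chunk is the canonical bin
theorem pv_binA_eq_canon (c : List Int) (hp : c.Pairwise (· ≤ ·)) :
    (c.foldl
      (fun acc value =>
        if |value - PySem.List.pyGetD c 0 0| < |value - PySem.List.pyGetD c (-1) 0|
        then acc ++ [PySem.List.pyGetD c 0 0]
        else acc ++ [PySem.List.pyGetD c (-1) 0]) []) = pvCanonBin c := by
  rcases c with _ | ⟨x, t⟩
  · simp [pvCanonBin]
  · have hne : x :: t ≠ [] := by simp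
    have hlo : PySem.List.pyGetD (x :: t) 0 0 = x := PySem.List.pyGetD_zero_cons ..
    have hhi : PySem.List.pyGetD (x :: t) (-1) 0 = (x :: t).getLast hne :=
      PySem.List.pyGetD_neg_one _ _ hne
    unfold pvCanonBin
    rw [hlo, hhi]
    set L := (x :: t).getLast hne with hL
    have hbound : ∀ v ∈ x :: t, x ≤ v ∧ v ≤ L := by
      intro v hv
      refine ⟨?_, pv_le_getLast _ hne hp v hv⟩
      rcases List.mem_cons.mp hv with hv | hv
      · simp [hv]
      · exact (List.pairwise_cons.mp hp).1 v hv
    rw [PySem.List.foldl_congr_mem' (x :: t) _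
      (fun acc value => acc ++ [if 2 * value < x + L then x else L]) []
      (by
        intro v hv acc
        rcases hbound v hv with ⟨h1, h2⟩
        have he : (|v - x| < |v - L|) ↔ (2 * v < x + L) := by
          rw [abs_of_nonneg (by omega : (0:Int) ≤ v - x),
              abs_of_nonpos (by omega : v - L ≤ (0:Int))]
          omega
        by_cases hc : 2 * v < x + L <;> simp [he, hc])]
    rw [PySem.List.foldl_append_singleton_eq_map]
    simp

def pvStep (s : Int) (h : Int → Int → Int) (out : List (List Int)) (jv : Int × Int) : List (List Int) :=
  if PySem.Int.mod jv.1 s = 0 then out ++ [[h jv.1 jv.2]]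
  else out.dropLast ++ [out.getLastD [] ++ [h jv.1 jv.2]]

-- the inner run of a bin: indices with nonzero remainder extend the last open bin
theorem pv_inner (s : Int) (h : Int → Int → Int) :
    ∀ (t : List Int) (j0 : Int) (out : List (List Int)) (cur : List Int),
    (∀ i : ℕ, i < t.length → PySem.Int.mod (j0 + i) s ≠ 0) →
    (PySem.List.enumerate t j0).foldl (pvStep s h) (out ++ [cur]) =
      out ++ [cur ++ (PySem.List.enumerate t j0).map (fun p => h p.1 p.2)] := by
  intro t
  induction t with
  | nil => intro j0 out cur _; simp [PySem.List.enumerate_nil]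
  | cons x t ih =>
    intro j0 out cur hcond
    rw [PySem.List.enumerate_cons]
    simp only [List.foldl_cons, List.map_cons]
    have h0 : PySem.Int.mod j0 s ≠ 0 := by
      have := hcond 0 (by simp)
      simpa using this
    rw [show pvStep s h (out ++ [cur]) (j0, x) = out ++ [(cur ++ [h j0 x])] from by
      simp [pvStep, h0]]
    rw [ih (j0 + 1) out (cur ++ [h j0 x]) (fun i hi => by
      have heq : j0 + 1 + (i : Int) = j0 + ((i + 1 : ℕ) : Int) := by push_cast; ring
      rw [heq]
      exact hcond (i + 1) (by simpa using Nat.succ_lt_succ hi))]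
    simp

theorem pv_group (s : Int) (hs : 0 < s) (h : Int → Int → Int) :
    ∀ (N : ℕ) (l : List Int), l.length ≤ N → ∀ (m : ℕ), s.toNat ∣ m → ∀ (out : List (List Int)),
    (PySem.List.enumerate l (m : Int)).foldl (pvStep s h) out =
      out ++ pvChunksIdx s.toNat h m l := by
  have hsK : s = (s.toNat : Int) := (Int.toNat_of_nonneg hs.le).symm
  have hK : 0 < s.toNat := by omega
  intro N
  induction N with
  | zero =>
    intro l hl m _ out
    have : l = [] := by
      cases l with
      | nil => rfl
      | cons a b => simp at hl
    subst this
    simp [pvChunksIdx, PySem.List.enumerate_nil]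
  | succ N ih =>
    intro l hl m hm out
    cases l with
    | nil => simp [pvChunksIdx, PySem.List.enumerate_nil]
    | cons x rest =>
      obtain ⟨q, hq⟩ := hm
      rw [PySem.List.enumerate_cons]
      simp only [List.foldl_cons]
      have hm0 : PySem.Int.mod (m : Int) s = 0 := by
        rw [hsK, PySem.Int.mod_natCast, hq, Nat.mul_mod_right]
        simp
      rw [show pvStep s h out ((m : Int), x) = out ++ [[h (m : Int) x]] from by
        simp [pvStep, hm0]]
      -- split rest into the remainder of this bin and the later bins
      have hsplit : rest = rest.take (s.toNat - 1) ++ rest.drop (s.toNat - 1) :=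
        (List.take_append_drop _ _).symm
      rw [show PySem.List.enumerate rest ((m : Int) + 1) =
            PySem.List.enumerate (rest.take (s.toNat - 1)) ((m : Int) + 1) ++
            PySem.List.enumerate (rest.drop (s.toNat - 1))
              ((m : Int) + 1 + (rest.take (s.toNat - 1)).length) from by
        conv_lhs => rw [hsplit]
        rw [PySem.List.enumerate_append]]
      rw [List.foldl_append]
      rw [pv_inner s h (rest.take (s.toNat - 1)) ((m : Int) + 1) out [h (m : Int) x]
        (fun i hi => by
          have hi' : i < s.toNat - 1 := lt_of_lt_of_le hi (by simp)
          have heq : (m : Int) + 1 + (i : Int) = ((m + 1 + i : ℕ) : Int) := by push_cast; ring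
          rw [heq, hsK, PySem.Int.mod_natCast]
          have he2 : m + 1 + i = (1 + i) + s.toNat * q := by omega
          rw [he2, Nat.add_mul_mod_self_left, Nat.mod_eq_of_lt (by omega)]
          omega)]
      by_cases hlong : s.toNat - 1 ≤ rest.length
      · have hlen : (rest.take (s.toNat - 1)).length = s.toNat - 1 := by
          simp [hlong]
        have hstart : (m : Int) + 1 + ((rest.take (s.toNat - 1)).length : Int) =
            ((m + s.toNat : ℕ) : Int) := by
          rw [hlen]; push_cast; omega
        rw [hstart]
        rw [ih (rest.drop (s.toNat - 1)) (by simp at hl ⊢; omega) (m + s.toNat)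
          ⟨q + 1, by rw [Nat.mul_succ, ← hq]⟩ (out ++ [[h (m : Int) x] ++ _])]
        rw [pvChunksIdx]
        simp [PySem.List.enumerate_cons]
      · have hnil : rest.drop (s.toNat - 1) = [] := by
          rw [List.drop_eq_nil_iff]
          omega
        rw [hnil, PySem.List.enumerate_nil]
        simp only [List.foldl_nil]
        rw [pvChunksIdx, hnil]
        rw [pvChunksIdx]
        simp [PySem.List.enumerate_cons]

def pvSnap (d : List Int) (s : Int) (j v : Int) : Int :=
  let base := j - PySem.Int.mod j s
  let lo := PySem.List.pyGetD d base 0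
  let hi := PySem.List.pyGetD d (min (base + s) (d.length : Int) - 1) 0
  if 2 * v < lo + hi then lo else hi

-- inside one bin, the globally-indexed snap agrees with the canonical local one
theorem pv_chunk_snap (d : List Int) (s : Int) (hs : 0 < s) (m : ℕ)
    (hmK : s.toNat ∣ m) (hm : m < d.length) :
    (PySem.List.enumerate ((d.drop m).take s.toNat) (m : Int)).map
      (fun p => pvSnap d s p.1 p.2) = pvCanonBin ((d.drop m).take s.toNat) := by
  have hsK : s = (s.toNat : Int) := (Int.toNat_of_nonneg hs.le).symm
  have hK : 0 < s.toNat := by omega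
  set ch := (d.drop m).take s.toNat with hch
  have hclen : ch.length = min s.toNat (d.length - m) := by simp [hch]
  have hcpos : 0 < ch.length := by omega
  have hcget : ∀ (i : ℕ) (hi : i < ch.length) (hd : m + i < d.length), ch[i]'hi = d[m + i]'hd := by
    intro i hi hd
    simp only [hch, List.getElem_take, List.getElem_drop]
  have hcne : ch ≠ [] := by
    intro hh; rw [hh] at hcpos; simp at hcpos
  have hc0 : PySem.List.pyGetD ch 0 0 = d[m] := by
    rw [PySem.List.pyGetD_zero, List.getD_eq_getElem ch 0 hcpos, hcget 0 hcpos (by omega)]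
    simp
  have hclast : PySem.List.pyGetD ch (-1) 0 = d[min (m + s.toNat) d.length - 1]'(by omega) := by
    rw [PySem.List.pyGetD_neg_one _ _ hcne, List.getLast_eq_getElem,
      hcget (ch.length - 1) (by omega) (by omega)]
    congr 1
    omega
  unfold pvCanonBin
  apply List.ext_getElem
  · simp
  · intro i h1 h2
    have hi : i < ch.length := by simpa using h2
    simp only [List.getElem_map, PySem.List.getElem_enumerate]
    obtain ⟨q, hq⟩ := hmK
    have hmod : PySem.Int.mod ((m : Int) + (i : ℕ)) s = (i : Int) := by
      have he : (m : Int) + (i : ℕ) = ((m + i : ℕ) : Int) := by push_cast; ring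
      rw [he, hsK, PySem.Int.mod_natCast]
      have he2 : (m + i) % s.toNat = i := by
        have he3 : m + i = i + s.toNat * q := by omega
        rw [he3, Nat.add_mul_mod_self_left, Nat.mod_eq_of_lt (by omega)]
      rw [he2]
    unfold pvSnap
    simp only [hmod]
    have hbase : (m : Int) + (i : ℕ) - (i : ℕ) = ((m : ℕ) : Int) := by ring
    rw [hbase]
    have hlo : PySem.List.pyGetD d ((m : ℕ) : Int) 0 = d[m] := by
      rw [PySem.List.pyGetD_natCast]
      exact List.getD_eq_getElem d 0 hm
    have hhiIdx : min (((m : ℕ) : Int) + s) ((d.length : ℕ) : Int) - 1 =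
        ((min (m + s.toNat) d.length - 1 : ℕ) : Int) := by
      rw [hsK]; omega
    have hhi : PySem.List.pyGetD d (min (((m : ℕ) : Int) + s) ((d.length : ℕ) : Int) - 1) 0 =
        d[min (m + s.toNat) d.length - 1]'(by omega) := by
      rw [hhiIdx, PySem.List.pyGetD_natCast]
      exact List.getD_eq_getElem d 0 (by omega)
    simp only [hlo, hhi, hc0, hclast, hcget i hi (by omega)]

-- each suffix of d, chunk-processed with the global snap, is the canonical chunk map
theorem pv_chunksIdx_canon (d : List Int) (s : Int) (hs : 0 < s) :
    ∀ (N : ℕ) (m : ℕ), (d.drop m).length ≤ N → s.toNat ∣ m →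
    pvChunksIdx s.toNat (pvSnap d s) m (d.drop m) =
      (pvChunks s.toNat (d.drop m)).map pvCanonBin := by
  have hK : 0 < s.toNat := by omega
  intro N
  induction N with
  | zero =>
    intro m hlen _
    have hnil : d.drop m = [] := by
      cases hdm : d.drop m with
      | nil => rfl
      | cons a b => rw [hdm] at hlen; simp at hlen
    rw [hnil]
    simp [pvChunksIdx, pvChunks]
  | succ N ih =>
    intro m hlen hm
    cases hdm : d.drop m with
    | nil => simp [pvChunksIdx, pvChunks]
    | cons x rest =>
      rw [pvChunksIdx, pvChunks, List.map_cons]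
      have hm' : m < d.length := by
        by_contra hcon
        rw [List.drop_eq_nil_iff.mpr (by omega)] at hdm
        simp at hdm
      have hrest : rest = d.drop (m + 1) := by
        have h1 : d.drop (m + 1) = (d.drop m).drop 1 := by
          rw [List.drop_drop]
        rw [h1, hdm, List.drop_one, List.tail_cons]
      congr 1
      · have hsnap := pv_chunk_snap d s hs m hm hm'
        rw [hdm] at hsnap
        rw [show (x :: rest).take s.toNat = x :: rest.take (s.toNat - 1) from by
          obtain ⟨n, hn⟩ : ∃ n, s.toNat = n + 1 := ⟨s.toNat - 1, by omega⟩
          simp [hn]] at hsnap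
        exact hsnap
      · have hrest2 : rest.drop (s.toNat - 1) = d.drop (m + s.toNat) := by
          rw [hrest, List.drop_drop]
          congr 1
          omega
        rw [hrest2]
        obtain ⟨q, hq⟩ := hm
        refine ih (m + s.toNat) ?_ ⟨q + 1, by rw [Nat.mul_succ, ← hq]⟩
        have l1 : (d.drop m).length = d.length - m := by simp
        have l2 : (d.drop (m + s.toNat)).length = d.length - (m + s.toNat) := by simp
        omega

-- the A-side starts of pyRange cut the list into the same chunks
theorem pv_slices_chunks (s : Int) (hs : 0 < s) :
    ∀ (N : ℕ) (l : List Int), l.length ≤ N →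
    (PySem.List.pyRange 0 (l.length : Int) s).map
      (fun i => PySem.List.slice l (some i) (some (i + s))) = pvChunks s.toNat l := by
  have hK : 0 < s.toNat := by omega
  intro N
  induction N with
  | zero =>
    intro l hl
    have : l = [] := by
      cases l with
      | nil => rfl
      | cons a b => simp at hl
    subst this
    simp [pvChunks, pv_pyRange_pos_nil 0 0 s hs le_rfl]
  | succ N ih =>
    intro l hl
    cases l with
    | nil => simp [pvChunks, pv_pyRange_pos_nil 0 0 s hs le_rfl]
    | cons x rest =>
      have hlen0 : (0:Int) < (((x :: rest).length : ℕ) : Int) := by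
        simp
      rw [pv_pyRange_pos_cons 0 _ s hs hlen0, List.map_cons, pvChunks]
      congr 1
      · -- the first chunk
        rw [show (0:Int) + s = s from by ring]
        rw [PySem.List.slice_zero_start, PySem.List.slice_to _ hs.le]
        obtain ⟨n, hn⟩ : ∃ n, s.toNat = n + 1 := ⟨s.toNat - 1, by omega⟩
        simp [hn]
      · -- the remaining chunks
        rw [show PySem.List.pyRange ((0:Int) + s) (((x :: rest).length : ℕ) : Int) s =
              (PySem.List.pyRange 0 ((((x :: rest).length : ℕ) : Int) - s) s).map (· + s) from
            pv_pyRange_pos_shift 0 _ s hs, List.map_map]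
        have hrange : PySem.List.pyRange 0 ((((x :: rest).length : ℕ) : Int) - s) s =
            PySem.List.pyRange 0 (((rest.drop (s.toNat - 1)).length : ℕ) : Int) s := by
          by_cases hc : s.toNat ≤ (x :: rest).length
          · congr 1
            simp only [List.length_cons] at hc
            simp only [List.length_drop, List.length_cons]
            push_cast
            omega
          · rw [pv_pyRange_pos_nil _ _ _ hs (by simp at hc ⊢; omega),
              pv_pyRange_pos_nil _ _ _ hs (by simp at hc ⊢; omega)]
        rw [hrange]
        rw [← ih (rest.drop (s.toNat - 1)) (by simp at hl ⊢; omega)]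
        apply List.map_congr_left
        intro i hmem
        have hi : 0 ≤ i := ((PySem.List.mem_pyRange_iff_of_pos hs i).mp hmem).1
        simp only [Function.comp]
        rw [PySem.List.slice_toNat _ (by omega) (by omega),
          PySem.List.slice_toNat _ (by omega) (by omega)]
        rw [show rest.drop (s.toNat - 1) = (x :: rest).drop s.toNat from by
          obtain ⟨n, hn⟩ : ∃ n, s.toNat = n + 1 := ⟨s.toNat - 1, by omega⟩
          simp [hn]]
        rw [List.drop_drop]
        rw [show (i + s + s).toNat = s.toNat + i.toNat + s.toNat from by omega,
          show (i + s).toNat = s.toNat + i.toNat from by omega]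
        congr 1
        omega

-- ===== VERDICT (by name: the statement is the Claim_ definition above) =====
theorem binning_by_boundaries_spec : Claim_equal_binning_by_boundaries := by
  intro data bin_size _ hpre
  unfold Spec_binning_by_boundaries binning_by_boundaries binning_by_boundaries_alt
  simp only [if_neg hpre]
  by_cases hneg : bin_size < 0
  · rw [if_pos hneg, pv_pyRange_neg_nil _ _ hneg (Int.natCast_nonneg _)]
    rfl
  · rw [if_neg hneg]
    have hne : bin_size ≠ 0 := hpre
    have hs : 0 < bin_size := by omega
    set d := PySem.List.sorted data (fun x => x) false with hd
    have hsorted : d.Pairwise (· ≤ ·) := PySem.List.sorted_pairwise data (fun x => x)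
    -- A's loop produces the canonical chunk map
    have hA : (PySem.List.pyRange 0 (d.length : Int) bin_size).foldl
        (fun binned_data i =>
          let bin_data := PySem.List.slice d (some i) (some (i + bin_size))
          let min_val := PySem.List.pyGetD bin_data 0 0
          let max_val := PySem.List.pyGetD bin_data (-1) 0
          let bin_result := bin_data.foldl
            (fun acc value =>
              if |value - min_val| < |value - max_val| then acc ++ [min_val]
              else acc ++ [max_val]) []
          binned_data ++ [bin_result]) [] =
        (pvChunks bin_size.toNat d).map pvCanonBin := by
      rw [PySem.List.foldl_congr_mem' _ _
        (fun binned_data i =>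
          binned_data ++ [pvCanonBin (PySem.List.slice d (some i) (some (i + bin_size)))]) []
        (by
          intro i _ acc
          have hp : (PySem.List.slice d (some i) (some (i + bin_size))).Pairwise (· ≤ ·) :=
            hsorted.sublist (pv_slice_sublist _ _ _)
          show acc ++ [_] = acc ++ [_]
          rw [pv_binA_eq_canon _ hp])]
      rw [PySem.List.foldl_append_singleton_eq_map, List.nil_append]
      rw [show (PySem.List.pyRange 0 (d.length : Int) bin_size).map
            (fun i => pvCanonBin (PySem.List.slice d (some i) (some (i + bin_size)))) =
          ((PySem.List.pyRange 0 (d.length : Int) bin_size).map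
            (fun i => PySem.List.slice d (some i) (some (i + bin_size)))).map pvCanonBin from
        by rw [List.map_map]; rfl]
      rw [pv_slices_chunks bin_size hs d.length d le_rfl]
    rw [hA]
    -- B's loop produces the same chunk map
    have hB := pv_group bin_size hs (pvSnap d bin_size) d.length d le_rfl 0 ⟨0, rfl⟩ []
    simp only [Nat.cast_zero, List.nil_append] at hB
    have hC := pv_chunksIdx_canon d bin_size hs d.length 0 (by simp) ⟨0, rfl⟩
    simp only [List.drop_zero] at hC
    rw [← hC, ← hB]
    rfl
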